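-- pv_equiv track=rewrite | github.com/eirik-ff/ctf-writeups | npst23/dag18/solve.py | scytale_decrypt_bruteforce
-- ===== SOURCE A (Python) =====
-- def scytale_decrypt(ciphertext: str, turns: int) -> str:
--     assert len(ciphertext) % turns == 0, \
--         f"Turns ({turns}) must divide ciphertext length ({len(ciphertext)})"
--
--     letters_per_turn = len(ciphertext) // turns
--     plaintext = ""
--     for t in range(letters_per_turn):
--         row = ciphertext[t::letters_per_turn]
--         plaintext += row
--
--     return plaintext
--
-- def divisors(n: int) -> list[int]:
--     div = []
--     for d in range(1, n // 2 + 1):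
--         if n % d == 0:
--             div.append(d)
--
--     div.append(n)
--     return div
--
-- def scytale_decrypt_bruteforce(ciphertext: str,
--                                known_plaintext: str,
--                                ignore_case: bool = False) -> list[int]:
--     all_turns = divisors(len(ciphertext))
--
--     possible_turns = []
--     for turns in all_turns:
--         plaintext = scytale_decrypt(ciphertext, turns)
--
--         if ignore_case:
--             known = known_plaintext.lower()
--             plaintext = plaintext.lower()
--         else:
--             known = known_plaintext
--
--         if known in plaintext:
--             possible_turns.append(turns)
--
--     return possible_turns
-- ===== SOURCE B (Python) =====
-- def scytale_decrypt_bruteforce(ciphertext: str,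
--                                known_plaintext: str,
--                                ignore_case: bool = False) -> list[int]:
--     n = len(ciphertext)
--     text = ciphertext.lower() if ignore_case else ciphertext
--     known = known_plaintext.lower() if ignore_case else known_plaintext
--
--     # divisors of n in ascending order, via sqrt(n) pairing
--     small, large = [], []
--     d = 1
--     while d * d <= n:
--         if n % d == 0:
--             small.append(d)
--             if d * d != n:
--                 large.append(n // d)
--         d += 1
--
--     result = []
--     for turns in small + large[::-1]:
--         rows = n // turns
--         plaintext = "".join(text[t + k * rows] for t in range(rows)
--                             for k in range(turns))
--         if known in plaintext:
--             result.append(turns)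
--     return result
-- ===== Notes on version B (the rewrite author's own statement) =====
-- stated objective: alternative
-- what changed: B enumerates divisors by trial division up to sqrt(n) collecting each divisor pair (instead of scanning every integer up to n//2), and builds each candidate decryption by direct index arithmetic over the transposition grid (a single join comprehension) instead of concatenating stride slices; case-folding is hoisted out of the loop.
import Mathlib
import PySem

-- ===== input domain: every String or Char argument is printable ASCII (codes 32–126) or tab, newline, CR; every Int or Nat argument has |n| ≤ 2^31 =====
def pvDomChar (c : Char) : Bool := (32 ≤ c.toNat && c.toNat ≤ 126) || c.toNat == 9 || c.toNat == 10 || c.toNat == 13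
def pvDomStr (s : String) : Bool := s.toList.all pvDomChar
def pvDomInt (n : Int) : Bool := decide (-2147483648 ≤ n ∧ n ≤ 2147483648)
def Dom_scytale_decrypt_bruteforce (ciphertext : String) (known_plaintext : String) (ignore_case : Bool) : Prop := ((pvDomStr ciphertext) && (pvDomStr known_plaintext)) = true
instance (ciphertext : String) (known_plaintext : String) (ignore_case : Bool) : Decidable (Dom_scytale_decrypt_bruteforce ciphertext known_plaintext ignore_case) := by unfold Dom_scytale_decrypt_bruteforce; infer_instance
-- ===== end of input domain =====

-- B replaces A's divisor scan up to n//2 by sqrt-pairing trial division and builds each candidate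
-- decryption by direct index arithmetic instead of stride slices (objective: alternative).

-- ===== PORT A =====

-- divisors(n): scan d = 1 .. n//2, append n at the end
def pvDivisorsA (n : Int) : List Int :=
  ((PySem.List.pyRange 1 (PySem.Int.floordiv n 2 + 1) 1).foldl
    (fun acc d => if PySem.Int.mod n d = 0 then acc ++ [d] else acc) []) ++ [n]

-- scytale_decrypt: none = the assert fails or `len % turns` raises ZeroDivisionError (turns = 0);
-- both happen only for ciphertext = "", which Pre_ excludes.  Inside the loop the slice step
-- letters_per_turn is ≥ 1 whenever this is reached with some turns from divisors of a positive
-- length, so `slice?` is always `some` and `.getD []` is never taken there.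
def pvScytaleDecryptA (ct : List Char) (turns : Int) : Option (List Char) :=
  if turns ≠ 0 ∧ PySem.Int.mod (ct.length : Int) turns = 0 then
    some ((PySem.List.pyRange 0 (PySem.Int.floordiv (ct.length : Int) turns) 1).foldl
      (fun acc t =>
        acc ++ (PySem.List.slice? ct (some t) none (PySem.Int.floordiv (ct.length : Int) turns)).getD [])
      [])
  else none

def scytale_decrypt_bruteforce (ciphertext : String) (known_plaintext : String) (ignore_case : Bool) : List Int :=
  (pvDivisorsA (PySem.Str.len ciphertext)).foldl
    (fun acc turns =>
      match pvScytaleDecryptA ciphertext.toList turns with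
      | none => acc        -- Python raises here (only reachable for ciphertext = "", outside Pre_)
      | some pt =>
        let known := if ignore_case then PySem.Chars.lower known_plaintext.toList else known_plaintext.toList
        let pt' := if ignore_case then PySem.Chars.lower pt else pt
        if PySem.Chars.isIn known pt' then acc ++ [turns] else acc)
    []

-- ===== PORT B =====

-- the `while d * d <= n` loop of Source B; the `1 ≤ d` conjunct only totalizes the recursion
-- (every call chain starts at d = 1, as in Source B)
def pvDivLoopB (n : Nat) (d : Nat) (small : List Nat) (large : List Nat) : List Nat × List Nat :=
  if h : d * d ≤ n ∧ 1 ≤ d then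
    if n % d = 0 then
      pvDivLoopB n (d + 1) (small ++ [d]) (large ++ (if d * d = n then [] else [n / d]))
    else
      pvDivLoopB n (d + 1) small large
  else (small, large)
termination_by n + 1 - d
decreasing_by
  all_goals (have hd : d ≤ d * d := Nat.le_mul_of_pos_left d h.2; omega)

-- the join-comprehension `"".join(text[t + k * rows] for t in range(rows) for k in range(turns))`;
-- every index t + k*rows is < len(text) whenever turns divides len(text), so pyGetD's default
-- is never used on the inputs Source B reaches
def pvGridB (text : List Char) (rows : Nat) (turns : Nat) : List Char :=
  (List.range rows).flatMap (fun (t : Nat) =>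
    (List.range turns).map (fun (k : Nat) =>
      PySem.List.pyGetD text ((t : Int) + (k : Int) * (rows : Int)) ' '))

def scytale_decrypt_bruteforce_alt (ciphertext : String) (known_plaintext : String) (ignore_case : Bool) : List Int :=
  let n := ciphertext.toList.length
  let text := if ignore_case then PySem.Chars.lower ciphertext.toList else ciphertext.toList
  let known := if ignore_case then PySem.Chars.lower known_plaintext.toList else known_plaintext.toList
  let p := pvDivLoopB n 1 [] []
  (p.1 ++ p.2.reverse).foldl
    (fun acc turns =>
      if PySem.Chars.isIn known (pvGridB text (n / turns) turns) then acc ++ [(turns : Int)] else acc)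
    []

-- ===== PRECONDITION & SPEC =====

-- Pre_ excludes exactly the empty ciphertext, on which A raises ZeroDivisionError
-- (divisors(0) = [0] and scytale_decrypt then computes len % 0).
def Pre_scytale_decrypt_bruteforce (ciphertext : String) (known_plaintext : String) (ignore_case : Bool) : Prop :=
  ciphertext.toList ≠ []
instance (ciphertext : String) (known_plaintext : String) (ignore_case : Bool) : Decidable (Pre_scytale_decrypt_bruteforce ciphertext known_plaintext ignore_case) := by unfold Pre_scytale_decrypt_bruteforce; infer_instance

def pvWitness_scytale_decrypt_bruteforce : String × String × Bool := ("abab", "ba", false)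

def Spec_scytale_decrypt_bruteforce (ciphertext : String) (known_plaintext : String) (ignore_case : Bool) (out : List Int) : Prop := out = scytale_decrypt_bruteforce_alt ciphertext known_plaintext ignore_case
instance (ciphertext : String) (known_plaintext : String) (ignore_case : Bool) (out : List Int) : Decidable (Spec_scytale_decrypt_bruteforce ciphertext known_plaintext ignore_case out) := by unfold Spec_scytale_decrypt_bruteforce; infer_instance

-- ===== CLAIM (what is proved, stated in full; the proofs are below) =====
def Claim_equal_scytale_decrypt_bruteforce : Prop := ∀ (ciphertext : String) (known_plaintext : String) (ignore_case : Bool), Dom_scytale_decrypt_bruteforce ciphertext known_plaintext ignore_case → Pre_scytale_decrypt_bruteforce ciphertext known_plaintext ignore_case → Spec_scytale_decrypt_bruteforce ciphertext known_plaintext ignore_case (scytale_decrypt_bruteforce ciphertext known_plaintext ignore_case)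


-- ===== LEMMAS AND PROOFS =====

-- ---- proof-side abbreviations ----
def pvDivListB (m : Nat) : List Nat :=
  (pvDivLoopB m 1 [] []).1 ++ (pvDivLoopB m 1 [] []).2.reverse

def pvSmallF (m d : Nat) : List Nat :=
  (List.range' d (Nat.sqrt m + 1 - d)).filter (fun x => m % x = 0)

def pvLargeF (m d : Nat) : List Nat :=
  ((pvSmallF m d).filter (fun x => x * x ≠ m)).map (fun x => m / x)

-- a proper divisor is at most half
theorem pv_le_half {d m : Nat} (hdvd : d ∣ m) (hd : 1 ≤ d) (hne : d ≠ m) (hm : 1 ≤ m) : d ≤ m / 2 := by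
  obtain ⟨c, hc⟩ := hdvd
  have hc2 : 2 ≤ c := by
    rcases Nat.lt_or_ge c 2 with h | h
    · interval_cases c <;> omega
    · exact h
  have : d * 2 ≤ d * c := Nat.mul_le_mul_left d hc2
  omega

-- ---- the loop of B computes pvSmallF / pvLargeF ----
theorem pvDivLoopB_spec (m : Nat) : ∀ j d s l, 1 ≤ d → Nat.sqrt m + 1 - d = j →
    pvDivLoopB m d s l = (s ++ pvSmallF m d, l ++ pvLargeF m d) := by
  intro j
  induction j with
  | zero =>
    intro d s l hd hj
    have hlt : Nat.sqrt m < d := by omega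
    have : ¬ (d * d ≤ m) := by
      have := Nat.sqrt_lt.mp hlt
      omega
    rw [pvDivLoopB]
    simp only [this, false_and, dite_false]
    have h0 : Nat.sqrt m + 1 - d = 0 := by omega
    simp [pvSmallF, pvLargeF, h0]
  | succ j ih =>
    intro d s l hd hj
    have hle : d ≤ Nat.sqrt m := by omega
    have hdd : d * d ≤ m := Nat.le_sqrt.mp hle
    have hsplit : pvSmallF m d = (if m % d = 0 then [d] else []) ++ pvSmallF m (d + 1) := by
      have hr : List.range' d (Nat.sqrt m + 1 - d) = d :: List.range' (d + 1) (Nat.sqrt m + 1 - (d + 1)) := by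
        have : Nat.sqrt m + 1 - d = (Nat.sqrt m + 1 - (d + 1)) + 1 := by omega
        rw [this, List.range'_succ]
      rw [pvSmallF, hr]
      by_cases h : m % d = 0 <;> simp [h, pvSmallF]
    have hlsplit : pvLargeF m d =
        (if m % d = 0 then (if d * d = m then [] else [m / d]) else []) ++ pvLargeF m (d + 1) := by
      rw [pvLargeF, hsplit]
      by_cases h : m % d = 0
      · by_cases h2 : d * d = m <;> simp [h, h2, pvLargeF]
      · simp [h, pvLargeF]
    rw [pvDivLoopB]
    simp only [hdd, hd, and_true, dite_true]
    by_cases h : m % d = 0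
    · rw [if_pos h, ih (d + 1) _ _ (by omega) (by omega), hsplit, hlsplit]
      simp [h, List.append_assoc]
    · rw [if_neg h, ih (d + 1) _ _ (by omega) (by omega), hsplit, hlsplit]
      simp [h]

-- ---- membership in B's divisor list ----
theorem pvSmallF_mem {m x : Nat} (hm : 1 ≤ m) :
    x ∈ pvSmallF m 1 ↔ (x ∣ m ∧ 1 ≤ x ∧ x * x ≤ m) := by
  simp only [pvSmallF, List.mem_filter, List.mem_range'_1, decide_eq_true_eq]
  constructor
  · rintro ⟨⟨h1, h2⟩, h3⟩
    have hx : x ≤ Nat.sqrt m := by omega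
    exact ⟨Nat.dvd_iff_mod_eq_zero.mpr h3, h1, Nat.le_sqrt.mp hx⟩
  · rintro ⟨h1, h2, h3⟩
    have hx : x ≤ Nat.sqrt m := Nat.le_sqrt.mpr h3
    exact ⟨⟨h2, by omega⟩, Nat.dvd_iff_mod_eq_zero.mp h1⟩

theorem pvDivListB_mem {m x : Nat} (hm : 1 ≤ m) :
    x ∈ pvDivListB m ↔ (x ∣ m ∧ 1 ≤ x) := by
  have hspec := pvDivLoopB_spec m (Nat.sqrt m + 1 - 1) 1 [] [] (by omega) rfl
  rw [pvDivListB, hspec]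
  simp only [List.nil_append, List.mem_append, List.mem_reverse]
  constructor
  · rintro (h | h)
    · have := (pvSmallF_mem hm).mp h
      exact ⟨this.1, this.2.1⟩
    · rw [pvLargeF] at h
      obtain ⟨y, hy, hxy⟩ := List.mem_map.mp h
      have hy' := (pvSmallF_mem hm).mp (List.mem_filter.mp hy).1
      subst hxy
      refine ⟨Nat.div_dvd_of_dvd hy'.1, ?_⟩
      have hyle : y ≤ m := Nat.le_of_dvd (by omega) hy'.1
      exact Nat.div_pos hyle (by omega)
  · rintro ⟨h1, h2⟩
    by_cases hx : x * x ≤ m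
    · exact Or.inl ((pvSmallF_mem hm).mpr ⟨h1, h2, hx⟩)
    · right
      rw [pvLargeF]
      refine List.mem_map.mpr ⟨m / x, List.mem_filter.mpr ⟨?_, ?_⟩, ?_⟩
      · -- m / x ∈ pvSmallF m 1
        have hxm : x ≤ m := Nat.le_of_dvd (by omega) h1
        have hmul : m / x * x = m := Nat.div_mul_cancel h1
        have hpos : 1 ≤ m / x := Nat.div_pos hxm (by omega)
        have hlt : m / x < x := by
          by_contra hge
          replace hge := Nat.le_of_not_lt hge
          have : x * x ≤ m / x * x := Nat.mul_le_mul_right x hge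
          omega
        have hsq : m / x * (m / x) ≤ m := by
          calc m / x * (m / x) ≤ m / x * x := Nat.mul_le_mul_left _ (by omega)
          _ = m := hmul
        exact (pvSmallF_mem hm).mpr ⟨Nat.div_dvd_of_dvd h1, hpos, hsq⟩
      · -- (m / x) * (m / x) ≠ m
        have hxm : x ≤ m := Nat.le_of_dvd (by omega) h1
        have hmul : m / x * x = m := Nat.div_mul_cancel h1
        have hlt : m / x < x := by
          by_contra hge
          replace hge := Nat.le_of_not_lt hge
          have : x * x ≤ m / x * x := Nat.mul_le_mul_right x hge
          omega
        have : m / x * (m / x) < m := by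
          calc m / x * (m / x) < m / x * x := by
                have h0 : 0 < m / x := Nat.div_pos hxm (by omega)
                exact (Nat.mul_lt_mul_left h0).mpr hlt
          _ = m := hmul
        simp only [decide_eq_true_eq]
        omega
      · exact Nat.div_div_self h1 (by omega)

-- ---- B's divisor list is strictly increasing ----
theorem pvDivListB_pairwise {m : Nat} (hm : 1 ≤ m) :
    List.Pairwise (· < ·) (pvDivListB m) := by
  have hspec := pvDivLoopB_spec m (Nat.sqrt m + 1 - 1) 1 [] [] (by omega) rfl
  rw [pvDivListB, hspec]
  simp only [List.nil_append]
  rw [List.pairwise_append]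
  refine ⟨List.Pairwise.filter _ (List.pairwise_lt_range' 1), ?_, ?_⟩
  · rw [List.pairwise_reverse]
    rw [pvLargeF, List.pairwise_map]
    have hpw : List.Pairwise (· < ·) ((pvSmallF m 1).filter (fun x => x * x ≠ m)) :=
      List.Pairwise.filter _ (List.Pairwise.filter _ (List.pairwise_lt_range' 1))
    refine List.Pairwise.imp_of_mem ?_ hpw
    intro a b ha hb hab
    have ha' := (pvSmallF_mem hm).mp (List.mem_filter.mp ha).1
    have hb' := (pvSmallF_mem hm).mp (List.mem_filter.mp hb).1
    -- a < b, both divide m  ⇒  m / b < m / a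
    have hbm : b * (m / b) = m := Nat.mul_div_cancel' hb'.1
    have ham : a * (m / a) = m := Nat.mul_div_cancel' ha'.1
    have hbpos : 0 < m / b := Nat.div_pos (Nat.le_of_dvd (by omega) hb'.1) (by omega)
    have h1 : a * (m / b) < b * (m / b) := (Nat.mul_lt_mul_right hbpos).mpr hab
    have h2 : a * (m / b) < a * (m / a) := by omega
    exact Nat.lt_of_mul_lt_mul_left h2
  · intro a ha b hb
    have ha' := (pvSmallF_mem hm).mp ha
    obtain ⟨y, hy, hby⟩ := List.mem_map.mp (List.mem_reverse.mp hb)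
    have hy' := (pvSmallF_mem hm).mp (List.mem_filter.mp hy).1
    have hyne : ¬ (y * y = m) := by
      have := (List.mem_filter.mp hy).2
      simpa using this
    -- b = m / y with y*y < m  ⇒  m < b*b;  a*a ≤ m  ⇒  a < b
    have hymul : y * (m / y) = m := Nat.mul_div_cancel' hy'.1
    have hypos : 1 ≤ y := hy'.2.1
    have hygt : y < m / y := by
      by_contra hge
      replace hge := Nat.le_of_not_lt hge
      have : y * (m / y) ≤ y * y := Nat.mul_le_mul_left y hge
      omega
    have hmlt : m < m / y * (m / y) := by
      calc m = y * (m / y) := hymul.symm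
      _ < m / y * (m / y) := (Nat.mul_lt_mul_right (by omega)).mpr hygt
    subst hby
    nlinarith [ha'.2.2]

-- ---- A's divisor list: membership and sortedness, then A = B on divisor lists ----
theorem pvDivisorsA_eq {m : Nat} (hm : 1 ≤ m) :
    pvDivisorsA (m : Int) = (pvDivListB m).map (fun (k : Nat) => (k : Int)) := by
  have hDA : pvDivisorsA (m : Int) =
      ((PySem.List.pyRange 1 (PySem.Int.floordiv (m : Int) 2 + 1) 1).filter
        (fun d => decide (PySem.Int.mod (m : Int) d = 0))) ++ [(m : Int)] := by
    rw [pvDivisorsA, PySem.List.foldl_append_ite_eq_filter]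
    simp
  have hfd : PySem.Int.floordiv (m : Int) 2 = (m : Int) / 2 :=
    PySem.Int.floordiv_eq_ediv_of_pos (by omega)
  -- both sides are strictly increasing with the same members: they are equal
  have hmemA : ∀ x : Int, x ∈ pvDivisorsA (m : Int) ↔ ∃ k : Nat, k ∣ m ∧ 1 ≤ k ∧ x = (k : Int) := by
    intro x
    rw [hDA]
    simp only [List.mem_append, List.mem_filter, PySem.List.mem_pyRange_one, List.mem_singleton,
      decide_eq_true_eq, PySem.Int.mod_eq_zero_iff_dvd, hfd]
    constructor
    · rintro (⟨⟨h1, h2⟩, h3⟩ | h)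
      · refine ⟨x.toNat, ?_, by omega, by omega⟩
        have hx : x = ((x.toNat : Nat) : Int) := by omega
        rw [hx] at h3
        exact_mod_cast h3
      · exact ⟨m, dvd_refl m, hm, h⟩
    · rintro ⟨k, hk1, hk2, rfl⟩
      by_cases hkm : k = m
      · exact Or.inr (by omega)
      · left
        have := pv_le_half hk1 hk2 hkm hm
        exact ⟨⟨by omega, by omega⟩, by exact_mod_cast hk1⟩
  have hmemB : ∀ x : Int, x ∈ (pvDivListB m).map (fun (k : Nat) => (k : Int)) ↔
      ∃ k : Nat, k ∣ m ∧ 1 ≤ k ∧ x = (k : Int) := by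
    intro x
    constructor
    · intro hx
      obtain ⟨k, hk, rfl⟩ := List.mem_map.mp hx
      have := (pvDivListB_mem hm).mp hk
      exact ⟨k, this.1, this.2, rfl⟩
    · rintro ⟨k, hk1, hk2, rfl⟩
      exact List.mem_map.mpr ⟨k, (pvDivListB_mem hm).mpr ⟨hk1, hk2⟩, rfl⟩
  have hpwA : List.Pairwise (· < ·) (pvDivisorsA (m : Int)) := by
    rw [hDA, List.pairwise_append]
    refine ⟨List.Pairwise.filter _ (PySem.List.pairwise_lt_pyRange_one 1 _), by simp, ?_⟩
    intro a ha b hb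
    simp only [List.mem_filter, PySem.List.mem_pyRange_one, hfd] at ha
    simp only [List.mem_singleton] at hb
    omega
  have hpwB : List.Pairwise (· < ·) ((pvDivListB m).map (fun (k : Nat) => (k : Int))) := by
    rw [List.pairwise_map]
    exact (pvDivListB_pairwise hm).imp (fun {a b} h => by exact_mod_cast h)
  have hperm : (pvDivisorsA (m : Int)).Perm ((pvDivListB m).map (fun (k : Nat) => (k : Int))) := by
    rw [List.perm_ext_iff_of_nodup (hpwA.imp ne_of_lt) (hpwB.imp ne_of_lt)]
    intro a; rw [hmemA, hmemB]
  exact List.Perm.eq_of_pairwise (fun a b _ _ h1 h2 => by omega) hpwA hpwB hperm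

-- ---- the stride slice ciphertext[t::L] is the k-indexed row ----
theorem pv_slice_step (ct : List Char) (L d t : Nat) (hL : 0 < L) (hd : 0 < d)
    (ht : t < L) (hlen : L * d = ct.length) :
    (PySem.List.slice? ct (some (t : Int)) none (L : Int)).getD [] =
      (List.range d).map (fun (k : Nat) => PySem.List.pyGetD ct ((t : Int) + (k : Int) * (L : Int)) ' ') := by
  have hstep : (L : Int) ≠ 0 := by omega
  have htm : t < ct.length := by nlinarith
  rw [PySem.List.slice?]
  simp only [hstep, if_false, PySem.List.sliceIndices]
  have hnotneg : ¬ ((L : Int) < 0) := by omega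
  simp only [hnotneg, if_false]
  have hstart : ¬ ((t : Int) < 0) := by omega
  simp only [hstart]
  simp only [if_false]
  have hmin : min (t : Int) (ct.length : Int) = (t : Int) := by omega
  rw [hmin]
  have hpos : (0 : Int) < (L : Int) := by omega
  have htlt : (t : Int) < (ct.length : Int) := by omega
  simp only [if_pos hpos, if_pos htlt]
  have hcount : (((ct.length : Int) - (t : Int) + (L : Int) - 1) / (L : Int)).toNat = d := by
    have hnum : (ct.length : Int) - (t : Int) + (L : Int) - 1 =
        ((L : Int) - 1 - (t : Int)) + (d : Int) * (L : Int) := by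
      have : (ct.length : Int) = (L : Int) * (d : Int) := by exact_mod_cast hlen.symm
      rw [this]; ring
    rw [hnum, Int.add_mul_ediv_right _ _ hstep,
      Int.ediv_eq_zero_of_lt (by omega) (by omega)]
    omega
  rw [hcount]
  have hcongr : ∀ x ∈ List.range d,
      (fun (x : Nat) => ct[((t : Int) + (L : Int) * (x : Nat)).toNat]?) x =
      (some ∘ fun (k : Nat) => PySem.List.pyGetD ct ((t : Int) + ((k : Nat) : Int) * (L : Int)) ' ') x := by
    intro k hk
    have hk' : k < d := List.mem_range.mp hk
    have hidx : t + L * k < ct.length := by nlinarith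
    have hcast : (t : Int) + (L : Int) * (k : Nat) = ((t + L * k : Nat) : Int) := by push_cast; ring
    have hcast2 : (t : Int) + ((k : Nat) : Int) * (L : Int) = ((t + L * k : Nat) : Int) := by
      push_cast; ring
    have h0 : (0 : Int) ≤ ((t + L * k : Nat) : Int) := by positivity
    have h1 : ((t + L * k : Nat) : Int) < (ct.length : Int) := by exact_mod_cast hidx
    simp only [Function.comp, hcast, hcast2]
    rw [PySem.List.pyGetD_eq_getElem ct ' ' h0 h1]
    simp only [Int.toNat_natCast]
    rw [List.getElem?_eq_getElem hidx]
  rw [List.filterMap_congr hcongr, List.filterMap_eq_map]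
  rfl

-- ---- A's scytale_decrypt on a divisor equals B's grid ----
theorem pvScytaleDecryptA_eq_grid (ct : List Char) (d : Nat) (hd : 1 ≤ d)
    (hdvd : d ∣ ct.length) (hm : 1 ≤ ct.length) :
    pvScytaleDecryptA ct (d : Int) = some (pvGridB ct (ct.length / d) d) := by
  set m := ct.length with hmdef
  have hdm : d ≤ m := Nat.le_of_dvd (by omega) hdvd
  have hL : 1 ≤ m / d := Nat.div_pos hdm (by omega)
  have hmul : m / d * d = m := Nat.div_mul_cancel hdvd
  rw [pvScytaleDecryptA]
  have hcond : ((d : Int) ≠ 0 ∧ PySem.Int.mod (m : Int) (d : Int) = 0) := by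
    constructor
    · omega
    · rw [PySem.Int.mod_natCast]
      have : m % d = 0 := Nat.dvd_iff_mod_eq_zero.mp hdvd
      omega
  rw [if_pos hcond]
  congr 1
  rw [PySem.Int.floordiv_natCast]
  rw [PySem.List.foldl_append_eq_flatMap
    (fun t => (PySem.List.slice? ct (some t) none ((m / d : Nat) : Int)).getD []) _ []]
  rw [List.nil_append, PySem.List.pyRange_zero_natCast, List.flatMap_map]
  rw [pvGridB]
  apply List.flatMap_congr    -- if missing, replaced below
  intro t ht
  have ht' : t < m / d := List.mem_range.mp ht
  exact pv_slice_step ct (m / d) d t (by omega) (by omega) ht' hmul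

-- ---- lowering commutes with the grid ----
theorem pv_grid_lower (cs : List Char) (L d : Nat) :
    PySem.Chars.lower (pvGridB cs L d) = pvGridB (PySem.Chars.lower cs) L d := by
  simp only [pvGridB, PySem.Chars.lower, List.map_flatMap]
  apply List.flatMap_congr
  intro t _
  rw [List.map_map]
  apply List.map_congr_left
  intro k _
  simp only [Function.comp]
  have hmap := PySem.List.pyGetD_map PySem.Chars.lowerChar cs ((t : Int) + (k : Int) * (L : Int)) ' '
  rw [← hmap, show PySem.Chars.lowerChar ' ' = ' ' from by decide]

-- ===== VERDICT (by name: the statement is the Claim_ definition above) =====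
theorem scytale_decrypt_bruteforce_spec : Claim_equal_scytale_decrypt_bruteforce := by
  intro ct kp ic _ hpre
  unfold Spec_scytale_decrypt_bruteforce
  have hm : 1 ≤ ct.toList.length := by
    rcases h : ct.toList with _ | ⟨c, cs⟩
    · exact absurd h hpre
    · simp
  rw [scytale_decrypt_bruteforce, scytale_decrypt_bruteforce_alt]
  simp only [PySem.Str.len]
  rw [pvDivisorsA_eq hm, List.foldl_map]
  have hlist : (pvDivLoopB ct.toList.length 1 [] []).1 ++ (pvDivLoopB ct.toList.length 1 [] []).2.reverse
      = pvDivListB ct.toList.length := rfl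
  rw [hlist]
  apply PySem.List.foldl_congr_mem
  intro acc k hk
  have hk' := (pvDivListB_mem hm).mp hk
  rw [pvScytaleDecryptA_eq_grid ct.toList k hk'.2 hk'.1 hm]
  simp only
  cases ic with
  | false => simp
  | true => simp [pv_grid_lower]
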